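-- pv_equiv track=rewrite | github.com/seventhsense07/Geeks-for-Geeks-POTD-Solved | January 2023/POTD 19-01-2023.py | carpetBox
-- ===== SOURCE A (Python) =====
-- def carpetBox(A,B,C,D):
--     s=0
--     x=A
--     y=B
--     while x>C or y>D:
--         if x>C:
--             s+=1
--             x//=2
--         if y>D:
--             s+=1
--             y//=2
--     ans=s
--     s=0
--     x=B
--     y=A
--     while x>C or y>D:
--         if x>C:
--             s+=1
--             x//=2
--         if y>D:
--             s+=1
--             y//=2
--     return min(ans,s)
-- ===== SOURCE B (Python) =====
-- def carpetBox(A, B, C, D):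
--     # closed-form: number of halvings to bring n to <= limit, via bit_length
--     def halve(n, limit):
--         if n <= limit:
--             return 0
--         return (n // (limit + 1)).bit_length()
--     return min(halve(A, C) + halve(B, D), halve(B, C) + halve(A, D))
-- ===== Notes on version B (the rewrite author's own statement) =====
-- stated objective: alternative
-- what changed: Replaces the two coupled halving while-loops with a closed-form helper: the count for each value/limit pair is computed directly as (n // (limit+1)).bit_length(), and the answer is min of the two cross sums.
import Mathlib
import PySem

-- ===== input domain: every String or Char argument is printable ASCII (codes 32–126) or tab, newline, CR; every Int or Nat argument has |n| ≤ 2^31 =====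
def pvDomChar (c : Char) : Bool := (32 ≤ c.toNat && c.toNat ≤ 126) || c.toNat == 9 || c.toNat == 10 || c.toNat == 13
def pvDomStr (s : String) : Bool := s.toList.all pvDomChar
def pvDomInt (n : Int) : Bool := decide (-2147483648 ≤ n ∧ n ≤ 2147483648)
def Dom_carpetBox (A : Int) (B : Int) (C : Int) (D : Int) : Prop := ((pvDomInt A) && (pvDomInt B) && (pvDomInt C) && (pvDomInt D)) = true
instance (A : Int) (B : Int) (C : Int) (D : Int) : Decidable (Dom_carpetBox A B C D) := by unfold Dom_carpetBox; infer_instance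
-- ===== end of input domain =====

-- B replaces A's two coupled halving while-loops by a closed-form bit_length count per
-- (value, limit) pair (objective: alternative — direct arithmetic instead of the loops).

-- ===== PORT A =====
-- A's while-loop, transcribed step for step; fuel bounds the recursion (100 always
-- suffices on Dom ∩ Pre_, where at most 33 halvings per variable occur).
def carpetBoxLoop : Nat → Int → Int → Int → Int → Int → Int
  | 0, s, _, _, _, _ => s
  | (f+1), s, x, y, C, D =>
    if x > C ∨ y > D then
      let s1 := if x > C then s + 1 else s
      let x1 := if x > C then PySem.Int.floordiv x 2 else x
      let s2 := if y > D then s1 + 1 else s1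
      let y1 := if y > D then PySem.Int.floordiv y 2 else y
      carpetBoxLoop f s2 x1 y1 C D
    else s

def carpetBox (A : Int) (B : Int) (C : Int) (D : Int) : Int :=
  min (carpetBoxLoop 100 0 A B C D) (carpetBoxLoop 100 0 B A C D)

-- ===== PORT B =====
def halveAlt (n : Int) (limit : Int) : Int :=
  if n ≤ limit then 0
  else (PySem.Int.bitLength (PySem.Int.floordiv n (limit + 1)) : Int)

def carpetBox_alt (A : Int) (B : Int) (C : Int) (D : Int) : Int :=
  min (halveAlt A C + halveAlt B D) (halveAlt B C + halveAlt A D)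

-- ===== PRECONDITION & SPEC =====
-- Pre_ is exactly where the Python A terminates: each of the four (value, limit) pairs the
-- two loops reduce must either already satisfy value ≤ limit or have a nonnegative limit
-- (otherwise repeated floor-halving never gets below the limit and A loops forever).
def Pre_carpetBox (A : Int) (B : Int) (C : Int) (D : Int) : Prop :=
  (A ≤ C ∨ 0 ≤ C) ∧ (B ≤ D ∨ 0 ≤ D) ∧ (B ≤ C ∨ 0 ≤ C) ∧ (A ≤ D ∨ 0 ≤ D)
instance (A : Int) (B : Int) (C : Int) (D : Int) : Decidable (Pre_carpetBox A B C D) := by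
  unfold Pre_carpetBox; infer_instance

def pvWitness_carpetBox : Int × Int × Int × Int := (9, 7, 2, 3)

def Spec_carpetBox (A : Int) (B : Int) (C : Int) (D : Int) (out : Int) : Prop := out = carpetBox_alt A B C D
instance (A : Int) (B : Int) (C : Int) (D : Int) (out : Int) : Decidable (Spec_carpetBox A B C D out) := by unfold Spec_carpetBox; infer_instance

-- ===== CLAIM (what is proved, stated in full; the proofs are below) =====
def Claim_equal_carpetBox : Prop := ∀ (A : Int) (B : Int) (C : Int) (D : Int), Dom_carpetBox A B C D → Pre_carpetBox A B C D → Spec_carpetBox A B C D (carpetBox A B C D)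

-- ===== LEMMAS AND PROOFS =====

lemma halveAlt_nonneg (n limit : Int) : 0 ≤ halveAlt n limit := by
  unfold halveAlt; split <;> positivity

lemma halveAlt_of_le {n limit : Int} (h : n ≤ limit) : halveAlt n limit = 0 := by
  simp [halveAlt, h]

lemma halveAlt_pos {n limit : Int} (h0 : 0 ≤ limit) (h : limit < n) :
    1 ≤ halveAlt n limit := by
  have ht : 0 < PySem.Int.floordiv n (limit + 1) := by
    rw [PySem.Int.floordiv_eq_ediv_of_pos (by omega)]
    have := (Int.le_ediv_iff_mul_le (show (0:Int) < limit + 1 by omega)).mpr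
      (show (1:Int) * (limit + 1) ≤ n by omega)
    omega
  rw [halveAlt, if_neg (by omega), PySem.Int.bitLength_of_pos ht]
  omega

-- the key recurrence: one halving step decrements the closed-form count
lemma halveAlt_step {n limit : Int} (h0 : 0 ≤ limit) (h : limit < n) :
    halveAlt n limit = 1 + halveAlt (PySem.Int.floordiv n 2) limit := by
  have hm : (0:Int) < limit + 1 := by omega
  have hedv : ∀ a : Int, PySem.Int.floordiv a (limit + 1) = a / (limit + 1) :=
    fun a => PySem.Int.floordiv_eq_ediv_of_pos hm
  have h2 : PySem.Int.floordiv n 2 = n / 2 := PySem.Int.floordiv_eq_ediv_of_pos (by omega)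
  have ht : 0 < PySem.Int.floordiv n (limit + 1) := by
    rw [hedv]
    have := (Int.le_ediv_iff_mul_le hm).mpr (show (1:Int) * (limit + 1) ≤ n by omega)
    omega
  -- commuting the two divisions: (n / (limit+1)) / 2 = (n / 2) / (limit+1)
  have hcomm : (n / (limit + 1)) / 2 = (n / 2) / (limit + 1) := by
    rw [Int.ediv_ediv_of_nonneg (by omega), Int.ediv_ediv_of_nonneg (by omega), mul_comm]
  rw [halveAlt, if_neg (by omega), PySem.Int.bitLength_of_pos ht]
  by_cases hle : PySem.Int.floordiv n 2 ≤ limit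
  · -- the halved value fits: the remaining count is 0 and the inner quotient is 0
    rw [h2] at hle
    have hz : PySem.Int.floordiv (PySem.Int.floordiv n (limit + 1)) 2 = 0 := by
      rw [PySem.Int.floordiv_eq_ediv_of_pos (show (0:Int) < 2 by omega), hedv, hcomm]
      exact Int.ediv_eq_zero_of_lt
        (Int.ediv_nonneg (by omega) (by omega)) (by omega)
    rw [hz, h2, halveAlt_of_le hle, PySem.Int.bitLength_zero]
    omega
  · rw [halveAlt, if_neg (by omega)]
    have : PySem.Int.floordiv (PySem.Int.floordiv n (limit + 1)) 2
        = PySem.Int.floordiv (PySem.Int.floordiv n 2) (limit + 1) := by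
      rw [PySem.Int.floordiv_eq_ediv_of_pos (show (0:Int) < 2 by omega), hedv, hedv, h2, hcomm]
    rw [this]; omega

-- within |n| ≤ 2^31 each count is at most 33 (used to discharge the fuel bound)
lemma bitLength_le_of_lt : ∀ (k : Nat) (t : Int), 0 ≤ t → t < 2 ^ k →
    PySem.Int.bitLength t ≤ k := by
  intro k
  induction k with
  | zero => intro t h0 h1; have : t = 0 := by omega
            simp [this, PySem.Int.bitLength_zero]
  | succ k ih =>
    intro t h0 h1
    rcases eq_or_lt_of_le h0 with h | h
    · simp [← h, PySem.Int.bitLength_zero]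
    · rw [PySem.Int.bitLength_of_pos h]
      have h2 : PySem.Int.floordiv t 2 = t / 2 := PySem.Int.floordiv_eq_ediv_of_pos (by omega)
      have hp : (2:Int) ^ (k+1) = 2 * 2 ^ k := by ring
      have := ih (PySem.Int.floordiv t 2) (by rw [h2]; omega)
        (by rw [h2]; omega)
      omega

lemma halveAlt_le_33 {n limit : Int} (hn : n ≤ 2147483648)
    (hp : n ≤ limit ∨ 0 ≤ limit) : halveAlt n limit ≤ 33 := by
  unfold halveAlt; split
  · omega
  · rename_i h
    have h0lim : 0 ≤ limit := by omega
    have hm : (0:Int) < limit + 1 := by omega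
    have hd : PySem.Int.floordiv n (limit + 1) = n / (limit + 1) :=
      PySem.Int.floordiv_eq_ediv_of_pos hm
    have h0 : 0 ≤ n / (limit + 1) := Int.ediv_nonneg (by omega) (by omega)
    have hle : n / (limit + 1) ≤ n := Int.ediv_le_self _ (by omega)
    have hp33 : (2:Int) ^ 33 = 8589934592 := by norm_num
    have hb := bitLength_le_of_lt 33 (PySem.Int.floordiv n (limit+1))
      (by omega) (by omega)
    omega

-- loop invariant: A's coupled loop computes s + halveAlt x C + halveAlt y D
lemma carpetBoxLoop_eq (C D : Int) : ∀ (f : Nat) (s x y : Int),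
    (x ≤ C ∨ 0 ≤ C) → (y ≤ D ∨ 0 ≤ D) →
    (halveAlt x C + halveAlt y D).toNat ≤ f →
    carpetBoxLoop f s x y C D = s + halveAlt x C + halveAlt y D := by
  intro f
  induction f with
  | zero =>
    intro s x y hx hy hf
    have h1 := halveAlt_nonneg x C
    have h2 := halveAlt_nonneg y D
    have hx0 : halveAlt x C = 0 := by omega
    have hy0 : halveAlt y D = 0 := by omega
    have hxle : x ≤ C := by
      by_contra hc
      have := halveAlt_pos (n := x) (limit := C) (by omega) (by omega)
      omega
    have hyle : y ≤ D := by
      by_contra hc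
      have := halveAlt_pos (n := y) (limit := D) (by omega) (by omega)
      omega
    simp [carpetBoxLoop, hx0, hy0]
  | succ f ih =>
    intro s x y hx hy hf
    by_cases hcond : x > C ∨ y > D
    · rw [carpetBoxLoop, if_pos hcond]
      have h1 := halveAlt_nonneg x C
      have h2 := halveAlt_nonneg y D
      by_cases hxc : x > C <;> by_cases hyd : y > D
      · have hCx : 0 ≤ C := by rcases hx with h | h; omega; exact h
        have hDy : 0 ≤ D := by rcases hy with h | h; omega; exact h
        have ex := halveAlt_step hCx hxc
        have ey := halveAlt_step hDy hyd
        simp only [if_pos hxc, if_pos hyd]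
        rw [ih (s+1+1) _ _ (Or.inr hCx) (Or.inr hDy) (by omega)]
        omega
      · have hCx : 0 ≤ C := by rcases hx with h | h; omega; exact h
        have ex := halveAlt_step hCx hxc
        simp only [if_pos hxc, if_neg hyd]
        rw [ih (s+1) _ _ (Or.inr hCx) hy (by omega)]
        omega
      · have hDy : 0 ≤ D := by rcases hy with h | h; omega; exact h
        have ey := halveAlt_step hDy hyd
        simp only [if_neg hxc, if_pos hyd]
        rw [ih (s+1) _ _ hx (Or.inr hDy) (by omega)]
        omega
      · omega
    · rw [carpetBoxLoop, if_neg hcond]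
      rw [halveAlt_of_le (by omega), halveAlt_of_le (by omega)]
      omega

-- ===== VERDICT (by name: the statement is the Claim_ definition above) =====
theorem carpetBox_spec : Claim_equal_carpetBox := by
  intro A B C D hdom hpre
  obtain ⟨h1, h2, h3, h4⟩ := hpre
  have hdom' : A ≤ 2147483648 ∧ B ≤ 2147483648 := by
    simp only [Dom_carpetBox, pvDomInt, Bool.and_eq_true, decide_eq_true_eq] at hdom
    omega
  have bA_C : halveAlt A C ≤ 33 := halveAlt_le_33 hdom'.1 h1
  have bB_D : halveAlt B D ≤ 33 := halveAlt_le_33 hdom'.2 h2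
  have bB_C : halveAlt B C ≤ 33 := halveAlt_le_33 hdom'.2 h3
  have bA_D : halveAlt A D ≤ 33 := halveAlt_le_33 hdom'.1 h4
  have n1 := halveAlt_nonneg A C
  have n2 := halveAlt_nonneg B D
  have n3 := halveAlt_nonneg B C
  have n4 := halveAlt_nonneg A D
  show carpetBox A B C D = carpetBox_alt A B C D
  unfold carpetBox carpetBox_alt
  rw [carpetBoxLoop_eq C D 100 0 A B h1 h2 (by omega),
      carpetBoxLoop_eq C D 100 0 B A h3 h4 (by omega)]
  simp
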